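-- pv_equiv track=rewrite | github.com/Adi3550/EAI201cu_ | bot brain/backend.py | dfs
-- ===== SOURCE A (Python) =====
-- graph = {
--     "Main Gate": {"Admin Block": 160},  # One-way entry
--     "Admin Block": {"Main Gate": 160, "Library": 60, "Student Center": 60},
--     "Library": {"Admin Block": 60},
--     "Student Center": {"Admin Block": 60, "Academic Block A": 60, "Academic Block B": 60, "Academic Block C": 60},
--     "Academic Block A": {"Student Center": 60},
--     "Academic Block C": {"Student Center": 60},
--     "Academic Block B": {"Student Center": 60, "Canteen": 180},
--     "Canteen": {"Academic Block B": 180, "Main Hostel": 70, "Sports Complex": 220},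
--     "Main Hostel": {"Canteen": 70, "Medical Center": 220, "Auditorium": 500},
--     "Medical Center": {"Main Hostel": 220},
--     "Sports Complex": {"Canteen": 220},
--     "Auditorium": {"Main Hostel": 500}
-- }
--
-- def get_path(came_from, goal):
--     path = [goal]
--     current = goal
--     while current in came_from and came_from[current] is not None:
--         current = came_from[current]
--         path.append(current)
--     path.reverse()  # Flip the path to start from the beginning
--     return path
--
-- def dfs(start, goal):
--     # Use a stack to go deep into one path
--     stack = [start]
--     # Keep track of where we came from
--     came_from = {start: None}
--     # Mark visited places
--     visited = set()
--     # Count how many places we check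
--     explored_count = 0
--     # Store steps for showing work
--     steps = []
--
--     while stack:
--         current = stack.pop()  # Take the last place from the stack
--         if current in visited:
--             continue  # Skip if already visited
--         visited.add(current)
--         explored_count += 1
--         steps.append(f"DFS Checking: {current}")
--         if current == goal:
--             break  # We found the goal!
--         for neighbor in reversed(list(graph.get(current, []))):  # Check in reverse for depth
--             if neighbor not in visited:
--                 stack.append(neighbor)  # Add to stack to go deeper
--                 came_from[neighbor] = current  # Remember where we came from
--     path = get_path(came_from, goal) if goal in visited else None
--     return path, explored_count, steps
-- ===== SOURCE B (Python) =====
-- graph = {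
--     "Main Gate": {"Admin Block": 160},  # One-way entry
--     "Admin Block": {"Main Gate": 160, "Library": 60, "Student Center": 60},
--     "Library": {"Admin Block": 60},
--     "Student Center": {"Admin Block": 60, "Academic Block A": 60, "Academic Block B": 60, "Academic Block C": 60},
--     "Academic Block A": {"Student Center": 60},
--     "Academic Block C": {"Student Center": 60},
--     "Academic Block B": {"Student Center": 60, "Canteen": 180},
--     "Canteen": {"Academic Block B": 180, "Main Hostel": 70, "Sports Complex": 220},
--     "Main Hostel": {"Canteen": 70, "Medical Center": 220, "Auditorium": 500},
--     "Medical Center": {"Main Hostel": 220},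
--     "Sports Complex": {"Canteen": 220},
--     "Auditorium": {"Main Hostel": 500}
-- }
--
-- def get_path(came_from, goal):
--     path = [goal]
--     current = goal
--     while current in came_from and came_from[current] is not None:
--         current = came_from[current]
--         path.append(current)
--     path.reverse()
--     return path
--
-- def dfs(start, goal):
--     # Recursive DFS: visit() returns True as soon as the goal is reached,
--     # and the flag is propagated up so exploration stops exactly there.
--     came_from = {start: None}
--     visited = set()
--     explored_count = 0
--     steps = []
--
--     def visit(current):
--         nonlocal explored_count
--         visited.add(current)
--         explored_count += 1
--         steps.append(f"DFS Checking: {current}")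
--         if current == goal:
--             return True
--         for neighbor in graph.get(current, []):
--             if neighbor not in visited:
--                 came_from[neighbor] = current
--                 if visit(neighbor):
--                     return True
--         return False
--
--     visit(start)
--     path = get_path(came_from, goal) if goal in visited else None
--     return path, explored_count, steps
-- ===== Notes on version B (the rewrite author's own statement) =====
-- stated objective: alternative
-- what changed: A's explicit-stack iterative DFS (push reversed neighbours, pop, skip-if-visited, break on goal) is replaced by a recursive DFS whose visit() helper marks/counts/logs each node and propagates a goal-found flag up through the neighbour loop so exploration stops exactly where A's break does.
import Mathlib
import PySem

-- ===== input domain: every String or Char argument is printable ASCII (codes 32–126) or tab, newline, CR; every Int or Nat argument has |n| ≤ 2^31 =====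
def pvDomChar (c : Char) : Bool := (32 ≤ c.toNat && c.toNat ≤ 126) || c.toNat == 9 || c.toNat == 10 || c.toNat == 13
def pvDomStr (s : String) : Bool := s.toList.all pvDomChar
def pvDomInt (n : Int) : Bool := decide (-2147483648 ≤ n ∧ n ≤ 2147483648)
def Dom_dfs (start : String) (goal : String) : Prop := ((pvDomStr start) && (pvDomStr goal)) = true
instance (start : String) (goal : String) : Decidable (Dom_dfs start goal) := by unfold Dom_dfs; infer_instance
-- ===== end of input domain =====

-- B replaces A's explicit-stack loop by a recursive DFS that propagates a goal-found
-- flag (objective: alternative decomposition, same cost).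

-- ===== PORT A =====
-- the module-level campus graph (a dict of dicts); shared context for both ports
def campusGraph : PySem.Dict String (PySem.Dict String Int) := PySem.Dict.ofList
  [ ("Main Gate", PySem.Dict.ofList [("Admin Block", 160)])
  , ("Admin Block", PySem.Dict.ofList [("Main Gate", 160), ("Library", 60), ("Student Center", 60)])
  , ("Library", PySem.Dict.ofList [("Admin Block", 60)])
  , ("Student Center", PySem.Dict.ofList [("Admin Block", 60), ("Academic Block A", 60), ("Academic Block B", 60), ("Academic Block C", 60)])
  , ("Academic Block A", PySem.Dict.ofList [("Student Center", 60)])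
  , ("Academic Block C", PySem.Dict.ofList [("Student Center", 60)])
  , ("Academic Block B", PySem.Dict.ofList [("Student Center", 60), ("Canteen", 180)])
  , ("Canteen", PySem.Dict.ofList [("Academic Block B", 180), ("Main Hostel", 70), ("Sports Complex", 220)])
  , ("Main Hostel", PySem.Dict.ofList [("Canteen", 70), ("Medical Center", 220), ("Auditorium", 500)])
  , ("Medical Center", PySem.Dict.ofList [("Main Hostel", 220)])
  , ("Sports Complex", PySem.Dict.ofList [("Canteen", 220)])
  , ("Auditorium", PySem.Dict.ofList [("Main Hostel", 500)]) ]

-- list(graph.get(current, [])) : the neighbour keys in dict order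
def neighborsOf (cur : String) : List String :=
  match campusGraph.get? cur with
  | some d => d.keys
  | none => []

-- get_path: walk came_from back from goal, then reverse (fuel makes the while-loop total;
-- never exhausted on the acyclic came_from maps both ports build)
def getPathLoop (cf : PySem.Dict String (Option String)) : Nat → String → List String → List String
  | 0, _, path => path
  | fuel + 1, current, path =>
    match cf.get? current with
    | some (some prev) => getPathLoop cf fuel prev (path ++ [prev])
    | _ => path

def getPath (cf : PySem.Dict String (Option String)) (goal : String) : List String :=
  (getPathLoop cf 100 goal [goal]).reverse

-- A's while-loop over the explicit stack (fuel bounds the iterations; 100 is never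
-- exhausted on the 12-node graph)
def dfsLoopA (goal : String) : Nat → List String → PySem.Dict String (Option String) →
    PySem.Set String → Int → List String →
    PySem.Dict String (Option String) × PySem.Set String × Int × List String
  | 0, _, cf, vis, c, st => (cf, vis, c, st)
  | fuel + 1, stack, cf, vis, c, st =>
    match PySem.List.pop? stack with
    | none => (cf, vis, c, st)
    | some (current, rest) =>
      if PySem.Set.contains vis current then dfsLoopA goal fuel rest cf vis c st
      else
        let vis' := PySem.Set.add vis current
        let c' := c + 1
        let st' := st ++ ["DFS Checking: " ++ current]
        if current == goal then (cf, vis', c', st')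
        else
          let p := (neighborsOf current).reverse.foldl
            (fun (p : List String × PySem.Dict String (Option String)) nb =>
              if PySem.Set.contains vis' nb then p
              else (p.1 ++ [nb], p.2.insert nb (some current)))
            (rest, cf)
          dfsLoopA goal fuel p.1 p.2 vis' c' st'

def dfs (start : String) (goal : String) : Option (List String) × Int × List String :=
  let r := dfsLoopA goal 100 [start] (PySem.Dict.empty.insert start none) PySem.Set.empty 0 []
  (if PySem.Set.contains r.2.1 goal then some (getPath r.1 goal) else none, r.2.2.1, r.2.2.2)

-- ===== PORT B =====
-- recursive DFS: visit(current) marks, counts, logs, and returns True once the goal is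
-- found; visitNbrs is the for-loop over the unvisited neighbours (fuel = recursion depth)
-- the for-loop over the neighbours, structural on the list; `visitRec` is the
-- recursive visit at the next depth
def visitNbrs
    (visitRec : String → PySem.Set String → Int → List String →
      PySem.Dict String (Option String) →
      Bool × PySem.Set String × Int × List String × PySem.Dict String (Option String))
    (cur : String) : List String → PySem.Set String → Int → List String →
    PySem.Dict String (Option String) →
    Bool × PySem.Set String × Int × List String × PySem.Dict String (Option String)
  | [], vis, c, st, cf => (false, vis, c, st, cf)
  | nb :: rest, vis, c, st, cf =>
    if PySem.Set.contains vis nb then visitNbrs visitRec cur rest vis c st cf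
    else
      match visitRec nb vis c st (cf.insert nb (some cur)) with
      | (true, vis', c', st', cf'') => (true, vis', c', st', cf'')
      | (false, vis', c', st', cf'') => visitNbrs visitRec cur rest vis' c' st' cf''

def visitB (goal : String) : Nat → String → PySem.Set String → Int → List String →
    PySem.Dict String (Option String) →
    Bool × PySem.Set String × Int × List String × PySem.Dict String (Option String)
  | 0, _, vis, c, st, cf => (false, vis, c, st, cf)
  | fuel + 1, cur, vis, c, st, cf =>
    let vis' := PySem.Set.add vis cur
    let c' := c + 1
    let st' := st ++ ["DFS Checking: " ++ cur]
    if cur == goal then (true, vis', c', st', cf)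
    else visitNbrs (visitB goal fuel) cur (neighborsOf cur) vis' c' st' cf

def dfs_alt (start : String) (goal : String) : Option (List String) × Int × List String :=
  let r := visitB goal 100 start PySem.Set.empty 0 [] (PySem.Dict.empty.insert start none)
  (if PySem.Set.contains r.2.1 goal then some (getPath r.2.2.2.2 goal) else none, r.2.2.1, r.2.2.2.1)

-- ===== PRECONDITION & SPEC =====
def Spec_dfs (start : String) (goal : String) (out : Option (List String) × Int × List String) : Prop := out = dfs_alt start goal
instance (start : String) (goal : String) (out : Option (List String) × Int × List String) : Decidable (Spec_dfs start goal out) := by unfold Spec_dfs; infer_instance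

-- ===== CLAIM (what is proved, stated in full; the proofs are below) =====
def Claim_equal_dfs : Prop := ∀ (start : String) (goal : String), Dom_dfs start goal → Spec_dfs start goal (dfs start goal)

-- ===== LEMMAS AND PROOFS =====

def nodeList : List String :=
  ["Main Gate", "Admin Block", "Library", "Student Center", "Academic Block A",
   "Academic Block C", "Academic Block B", "Canteen", "Main Hostel", "Medical Center",
   "Sports Complex", "Auditorium"]

theorem both_nodes : ∀ s ∈ nodeList, ∀ g ∈ nodeList, dfs s g = dfs_alt s g := by decide

theorem nonnode_goal_nodes : ∀ s ∈ nodeList, dfs s "?" = dfs_alt s "?" := by decide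

theorem campusGraph_keys : campusGraph.keys = nodeList := by decide

theorem neighborsOf_not_node {s : String} (h : s ∉ nodeList) : neighborsOf s = [] := by
  unfold neighborsOf
  rw [PySem.Dict.get?_eq_none_iff_not_mem_keys campusGraph s |>.mpr (campusGraph_keys ▸ h)]

theorem nbrs_nodes : ∀ s ∈ nodeList, ∀ n ∈ neighborsOf s, n ∈ nodeList := by decide

theorem neighborsOf_subset : ∀ s : String, ∀ n ∈ neighborsOf s, n ∈ nodeList := by
  intro s n hn
  by_cases hs : s ∈ nodeList
  · exact nbrs_nodes s hs n hn
  · rw [neighborsOf_not_node hs] at hn; cases hn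

-- elements pushed by A's neighbour fold stay inside nodeList
theorem push_mem (cur : String) (vis : PySem.Set String) :
    ∀ (nbs : List String) (p : List String × PySem.Dict String (Option String)),
    (∀ x ∈ p.1, x ∈ nodeList) → (∀ x ∈ nbs, x ∈ nodeList) →
    ∀ x ∈ (nbs.foldl
      (fun (p : List String × PySem.Dict String (Option String)) nb =>
        if PySem.Set.contains vis nb then p
        else (p.1 ++ [nb], p.2.insert nb (some cur))) p).1, x ∈ nodeList := by
  intro nbs
  induction nbs with
  | nil => intro p hp _ x hx; exact hp x hx
  | cons nb rest ih =>
    intro p hp hn x hx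
    simp only [List.foldl_cons] at hx
    by_cases hc : PySem.Set.contains vis nb
    · simp only [hc, if_true] at hx
      exact ih p hp (fun y hy => hn y (List.mem_cons_of_mem _ hy)) x hx
    · simp only [hc, if_false, Bool.false_eq_true] at hx
      refine ih _ ?_ (fun y hy => hn y (List.mem_cons_of_mem _ hy)) x hx
      intro y hy
      rcases List.mem_append.mp hy with h | h
      · exact hp y h
      · simp at h; subst h; exact hn _ (List.mem_cons_self ..)

theorem beq_false_of_node_nonnode {a g : String} (ha : a ∈ nodeList) (hg : g ∉ nodeList) :
    (a == g) = false :=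
  beq_eq_false_iff_ne.mpr (fun e => hg (e ▸ ha))

-- A's loop result does not depend on the goal when the goal is not a graph node
theorem loopA_goal_free : ∀ (fuel : Nat) (stack : List String) cf vis (c : Int) (st : List String)
    (g1 g2 : String), g1 ∉ nodeList → g2 ∉ nodeList → (∀ x ∈ stack, x ∈ nodeList) →
    dfsLoopA g1 fuel stack cf vis c st = dfsLoopA g2 fuel stack cf vis c st := by
  intro fuel
  induction fuel with
  | zero => intro stack cf vis c st g1 g2 _ _ _; rfl
  | succ n ih =>
    intro stack cf vis c st g1 g2 hg1 hg2 hstack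
    rcases List.eq_nil_or_concat stack with rfl | ⟨L, b, rfl⟩
    · rfl
    · have hb : b ∈ nodeList := hstack b (by simp)
      have hL : ∀ x ∈ L, x ∈ nodeList := fun x hx => hstack x (by simp [hx])
      simp only [List.concat_eq_append] at *
      simp only [dfsLoopA, PySem.List.pop?_last]
      by_cases hv : PySem.Set.contains vis b
      · simp only [hv, if_true]; exact ih L cf vis c st g1 g2 hg1 hg2 hL
      · simp only [hv, if_false, Bool.false_eq_true,
          beq_false_of_node_nonnode hb hg1, beq_false_of_node_nonnode hb hg2]
        exact ih _ _ _ _ _ g1 g2 hg1 hg2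
          (push_mem b _ _ (L, cf) hL (fun y hy => neighborsOf_subset b y (List.mem_reverse.mp hy)))

-- every element of A's final visited set is a graph node (or was there initially)
theorem loopA_vis : ∀ (fuel : Nat) (stack : List String) cf vis (c : Int) (st : List String)
    (g : String), (∀ x ∈ stack, x ∈ nodeList) → (∀ x ∈ vis, x ∈ nodeList) →
    ∀ x ∈ (dfsLoopA g fuel stack cf vis c st).2.1, x ∈ nodeList := by
  intro fuel
  induction fuel with
  | zero => intro stack cf vis c st g _ hvis x hx; exact hvis x hx
  | succ n ih =>
    intro stack cf vis c st g hstack hvis x hx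
    rcases List.eq_nil_or_concat stack with rfl | ⟨L, b, rfl⟩
    · exact hvis x hx
    · have hb : b ∈ nodeList := hstack b (by simp)
      have hL : ∀ y ∈ L, y ∈ nodeList := fun y hy => hstack y (by simp [hy])
      have hvis' : ∀ y ∈ PySem.Set.add vis b, y ∈ nodeList := by
        intro y hy
        rcases (PySem.Set.mem_add vis b y).mp hy with h | rfl
        · exact hvis y h
        · exact hb
      simp only [List.concat_eq_append] at *
      simp only [dfsLoopA, PySem.List.pop?_last] at hx
      by_cases hv : PySem.Set.contains vis b
      · simp only [hv, if_true] at hx; exact ih L cf vis c st g hL hvis x hx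
      · simp only [hv, if_false, Bool.false_eq_true] at hx
        by_cases hbg : (b == g) = true
        · simp only [hbg, if_true] at hx; exact hvis' x hx
        · simp only [hbg, if_false, Bool.false_eq_true] at hx
          exact ih _ _ _ _ _ g (push_mem b _ _ (L, cf) hL (fun y hy => neighborsOf_subset b y (List.mem_reverse.mp hy))) hvis' x hx

-- same two facts for B's recursion
theorem visitNbrs_congr : ∀ (r1 r2 : String → PySem.Set String → Int → List String →
    PySem.Dict String (Option String) →
    Bool × PySem.Set String × Int × List String × PySem.Dict String (Option String))
    (cur : String) (l : List String) vis (c : Int) (st : List String) cf,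
    (∀ nb ∈ l, ∀ vis c st cf, r1 nb vis c st cf = r2 nb vis c st cf) →
    visitNbrs r1 cur l vis c st cf = visitNbrs r2 cur l vis c st cf := by
  intro r1 r2 cur l
  induction l with
  | nil => intro vis c st cf _; rfl
  | cons nb rest ih =>
    intro vis c st cf h
    simp only [visitNbrs]
    by_cases hv : PySem.Set.contains vis nb
    · simp only [hv, if_true]; exact ih vis c st cf (fun y hy => h y (List.mem_cons_of_mem _ hy))
    · simp only [hv, if_false, Bool.false_eq_true, h nb (List.mem_cons_self ..)]
      rcases hr : r2 nb vis c st (cf.insert nb (some cur)) with ⟨found, vis', c', st', cf''⟩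
      cases found
      · exact ih vis' c' st' cf'' (fun y hy => h y (List.mem_cons_of_mem _ hy))
      · rfl

theorem visitB_goal_free : ∀ (fuel : Nat) (cur : String) vis (c : Int) (st : List String) cf
    (g1 g2 : String), g1 ∉ nodeList → g2 ∉ nodeList → cur ∈ nodeList →
    visitB g1 fuel cur vis c st cf = visitB g2 fuel cur vis c st cf := by
  intro fuel
  induction fuel with
  | zero => intro cur vis c st cf g1 g2 _ _ _; rfl
  | succ n ih =>
    intro cur vis c st cf g1 g2 hg1 hg2 hcur
    simp only [visitB, beq_false_of_node_nonnode hcur hg1,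
      beq_false_of_node_nonnode hcur hg2, if_false, Bool.false_eq_true]
    exact visitNbrs_congr _ _ cur (neighborsOf cur) _ _ _ cf
      (fun nb hnb vis c st cf => ih nb vis c st cf g1 g2 hg1 hg2 (neighborsOf_subset cur nb hnb))

theorem visitNbrs_vis : ∀ (r : String → PySem.Set String → Int → List String →
    PySem.Dict String (Option String) →
    Bool × PySem.Set String × Int × List String × PySem.Dict String (Option String))
    (cur : String) (l : List String) vis (c : Int) (st : List String) cf,
    (∀ nb ∈ l, ∀ vis c st cf,
      (∀ x ∈ vis, x ∈ nodeList) → ∀ x ∈ (r nb vis c st cf).2.1, x ∈ nodeList) →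
    (∀ x ∈ vis, x ∈ nodeList) →
    ∀ x ∈ (visitNbrs r cur l vis c st cf).2.1, x ∈ nodeList := by
  intro r cur l
  induction l with
  | nil => intro vis c st cf _ hvis x hx; exact hvis x hx
  | cons nb rest ih =>
    intro vis c st cf hr hvis x hx
    simp only [visitNbrs] at hx
    by_cases hv : PySem.Set.contains vis nb
    · simp only [hv, if_true] at hx
      exact ih vis c st cf (fun y hy => hr y (List.mem_cons_of_mem _ hy)) hvis x hx
    · simp only [hv, if_false, Bool.false_eq_true] at hx
      rcases hrr : r nb vis c st (cf.insert nb (some cur)) with ⟨found, vis', c', st', cf''⟩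
      have hvis' : ∀ y ∈ vis', y ∈ nodeList := by
        intro y hy
        have := hr nb (List.mem_cons_self ..) vis c st (cf.insert nb (some cur)) hvis y
        rw [hrr] at this; exact this hy
      rw [hrr] at hx
      cases found
      · exact ih vis' c' st' cf'' (fun y hy => hr y (List.mem_cons_of_mem _ hy)) hvis' x hx
      · exact hvis' x hx

theorem visitB_vis : ∀ (fuel : Nat) (cur : String) vis (c : Int) (st : List String) cf
    (g : String), cur ∈ nodeList → (∀ x ∈ vis, x ∈ nodeList) →
    ∀ x ∈ (visitB g fuel cur vis c st cf).2.1, x ∈ nodeList := by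
  intro fuel
  induction fuel with
  | zero => intro cur vis c st cf g _ hvis x hx; exact hvis x hx
  | succ n ih =>
    intro cur vis c st cf g hcur hvis x hx
    have hvis' : ∀ y ∈ PySem.Set.add vis cur, y ∈ nodeList := by
      intro y hy
      rcases (PySem.Set.mem_add vis cur y).mp hy with h | rfl
      · exact hvis y h
      · exact hcur
    simp only [visitB] at hx
    by_cases hcg : (cur == g) = true
    · simp only [hcg, if_true] at hx; exact hvis' x hx
    · simp only [hcg, if_false, Bool.false_eq_true] at hx
      exact visitNbrs_vis _ cur (neighborsOf cur) _ _ _ cf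
        (fun nb hnb vis c st cf hv => ih nb vis c st cf g (neighborsOf_subset cur nb hnb) hv)
        hvis' x hx

theorem qmark_not_node : "?" ∉ nodeList := by decide

-- A ignores a non-node goal: its whole result equals the result at the dummy non-node "?"
theorem A_nonnode_goal {s g : String} (hs : s ∈ nodeList) (hg : g ∉ nodeList) :
    dfs s g = dfs s "?" := by
  unfold dfs
  have hstack : ∀ x ∈ [s], x ∈ nodeList := by intro x hx; simp at hx; subst hx; exact hs
  have hcongr := loopA_goal_free 100 [s] (PySem.Dict.empty.insert s none) PySem.Set.empty 0 []
    g "?" hg qmark_not_node hstack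
  rw [hcongr]
  have hvis := loopA_vis 100 [s] (PySem.Dict.empty.insert s none) PySem.Set.empty 0 [] "?"
    hstack (by intro x hx; cases hx)
  have h1 : PySem.Set.contains
      (dfsLoopA "?" 100 [s] (PySem.Dict.empty.insert s none) PySem.Set.empty 0 []).2.1 g
      = false := by
    rw [← Bool.not_eq_true, PySem.Set.contains_iff]
    exact fun hm => hg (hvis g hm)
  have h2 : PySem.Set.contains
      (dfsLoopA "?" 100 [s] (PySem.Dict.empty.insert s none) PySem.Set.empty 0 []).2.1 "?"
      = false := by
    rw [← Bool.not_eq_true, PySem.Set.contains_iff]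
    exact fun hm => qmark_not_node (hvis "?" hm)
  simp only [h1, h2, if_false, Bool.false_eq_true]

theorem B_nonnode_goal {s g : String} (hs : s ∈ nodeList) (hg : g ∉ nodeList) :
    dfs_alt s g = dfs_alt s "?" := by
  unfold dfs_alt
  have hcongr := visitB_goal_free 100 s PySem.Set.empty 0 []
    (PySem.Dict.empty.insert s none) g "?" hg qmark_not_node hs
  rw [hcongr]
  have hvis := visitB_vis 100 s PySem.Set.empty 0 [] (PySem.Dict.empty.insert s none) "?"
    hs (by intro x hx; cases hx)
  have h1 : PySem.Set.contains
      (visitB "?" 100 s PySem.Set.empty 0 [] (PySem.Dict.empty.insert s none)).2.1 g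
      = false := by
    rw [← Bool.not_eq_true, PySem.Set.contains_iff]
    exact fun hm => hg (hvis g hm)
  have h2 : PySem.Set.contains
      (visitB "?" 100 s PySem.Set.empty 0 [] (PySem.Dict.empty.insert s none)).2.1 "?"
      = false := by
    rw [← Bool.not_eq_true, PySem.Set.contains_iff]
    exact fun hm => qmark_not_node (hvis "?" hm)
  simp only [h1, h2, if_false, Bool.false_eq_true]

-- variable-fuel step lemmas, used to evaluate both ports at a start with no neighbours
theorem loopA_found (g s : String) (cf : PySem.Dict String (Option String))
    (vis : PySem.Set String) (c : Int) (st : List String) (fuel : Nat)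
    (hv : PySem.Set.contains vis s = false) (hsg : (s == g) = true) :
    dfsLoopA g (fuel + 1) [s] cf vis c st
      = (cf, PySem.Set.add vis s, c + 1, st ++ ["DFS Checking: " ++ s]) := by
  have hp : PySem.List.pop? [s] = some (s, ([] : List String)) := PySem.List.pop?_last [] s
  simp only [dfsLoopA, hp, hv, hsg, Bool.false_eq_true, if_false, if_true]

theorem loopA_noNbrs (g s : String) (cf : PySem.Dict String (Option String))
    (vis : PySem.Set String) (c : Int) (st : List String) (fuel : Nat)
    (hv : PySem.Set.contains vis s = false) (hsg : (s == g) = false)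
    (hnb : neighborsOf s = []) :
    dfsLoopA g (fuel + 1 + 1) [s] cf vis c st
      = (cf, PySem.Set.add vis s, c + 1, st ++ ["DFS Checking: " ++ s]) := by
  have hp : PySem.List.pop? [s] = some (s, ([] : List String)) := PySem.List.pop?_last [] s
  have hp0 : PySem.List.pop? ([] : List String) = none := rfl
  simp only [dfsLoopA, hp, hp0, hv, hsg, Bool.false_eq_true, if_false, hnb,
    List.reverse_nil, List.foldl_nil]

theorem visitB_found (g s : String) (vis : PySem.Set String) (c : Int) (st : List String)
    (cf : PySem.Dict String (Option String)) (fuel : Nat) (hsg : (s == g) = true) :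
    visitB g (fuel + 1) s vis c st cf
      = (true, PySem.Set.add vis s, c + 1, st ++ ["DFS Checking: " ++ s], cf) := by
  simp only [visitB, hsg, if_true]

theorem visitB_noNbrs (g s : String) (vis : PySem.Set String) (c : Int) (st : List String)
    (cf : PySem.Dict String (Option String)) (fuel : Nat) (hsg : (s == g) = false)
    (hnb : neighborsOf s = []) :
    visitB g (fuel + 1) s vis c st cf
      = (false, PySem.Set.add vis s, c + 1, st ++ ["DFS Checking: " ++ s], cf) := by
  simp only [visitB, hsg, Bool.false_eq_true, if_false, hnb, visitNbrs]

-- a start outside the graph: both sides visit only `start` and stop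
theorem nonnode_start {s g : String} (hs : s ∉ nodeList) : dfs s g = dfs_alt s g := by
  have hnb : neighborsOf s = [] := neighborsOf_not_node hs
  have hv : PySem.Set.contains PySem.Set.empty s = false := rfl
  have hadd : PySem.Set.add PySem.Set.empty s = [s] := rfl
  unfold dfs dfs_alt
  by_cases hsg : (s == g) = true
  · have hgs : s = g := eq_of_beq hsg
    subst hgs
    rw [show (100 : Nat) = 99 + 1 from rfl, loopA_found s s _ _ _ _ 99 hv hsg,
      visitB_found s s _ _ _ _ 99 hsg]
  · have hsg' : (s == g) = false := by
      cases h : s == g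
      · rfl
      · exact absurd h hsg
    rw [show (100 : Nat) = 98 + 1 + 1 from rfl, loopA_noNbrs g s _ _ _ _ 98 hv hsg' hnb,
      visitB_noNbrs g s _ _ _ _ (98 + 1) hsg' hnb]

-- ===== VERDICT (by name: the statement is the Claim_ definition above) =====
theorem dfs_spec : Claim_equal_dfs := by
  intro s g _
  unfold Spec_dfs
  by_cases hs : s ∈ nodeList
  · by_cases hg : g ∈ nodeList
    · exact both_nodes s hs g hg
    · calc dfs s g = dfs s "?" := A_nonnode_goal hs hg
        _ = dfs_alt s "?" := nonnode_goal_nodes s hs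
        _ = dfs_alt s g := (B_nonnode_goal hs hg).symm
  · exact nonnode_start hs
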